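-- pv_equiv track=rewrite | github.com/anmaletic/PMA-Code | Test/6_2_compare.py | makniGetNajvece
-- ===== SOURCE A (Python) =====
-- def makniGetNajvece(lista:list, n):
--     for i in range(n):
--         if lista.count(max(lista)) > 1:
--             for j in range (lista.count(max(lista))):
--                 lista.remove(max(lista))
--         else:
--             lista.remove(max(lista))
--     return lista
-- ===== SOURCE B (Python) =====
-- def makniGetNajvece(lista: list, n):
--     if n <= 0:
--         return lista
--     d = sorted(set(lista), reverse=True)
--     threshold = d[n - 1]
--     return [x for x in lista if x < threshold]
-- ===== Notes on version B (the rewrite author's own statement) =====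
-- stated objective: faster
-- what changed: Instead of n passes each recomputing max/count and removing occurrences one by one, B sorts the distinct values once, takes the n-th largest as a threshold and keeps elements below it in a single filter pass.
import Mathlib
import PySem

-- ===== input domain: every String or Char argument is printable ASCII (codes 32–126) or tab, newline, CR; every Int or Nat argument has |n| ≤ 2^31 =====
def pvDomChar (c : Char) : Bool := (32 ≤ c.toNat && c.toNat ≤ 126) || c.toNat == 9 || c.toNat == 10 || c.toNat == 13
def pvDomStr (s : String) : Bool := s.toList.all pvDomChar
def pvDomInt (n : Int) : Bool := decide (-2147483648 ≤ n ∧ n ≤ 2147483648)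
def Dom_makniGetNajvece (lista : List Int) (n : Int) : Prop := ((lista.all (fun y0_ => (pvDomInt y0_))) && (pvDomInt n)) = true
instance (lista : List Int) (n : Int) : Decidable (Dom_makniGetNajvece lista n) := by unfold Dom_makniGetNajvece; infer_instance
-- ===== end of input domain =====

-- B replaces A's n remove-the-max passes by one sort of the distinct values plus a single threshold
-- filter (objective: faster). A mutates `lista` in place and returns it; B builds a new list —
-- the equivalence proved here is about the RETURN value only.

-- ===== PORT A =====
-- lista.remove(max(lista)) — one removal, recomputing max as the Python does
def pvRemoveMax (l : List Int) : List Int :=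
  match PySem.List.max? l (fun x => x) with
  | none => l      -- max([]) raises ValueError in Python; such states are excluded by Pre_
  | some m => (PySem.List.remove? l m).getD l

-- one iteration of A's outer loop
def pvStep (l : List Int) : List Int :=
  match PySem.List.max? l (fun x => x) with
  | none => l      -- max([]) raises ValueError in Python; excluded by Pre_
  | some m =>
    if 1 < PySem.List.count l m then
      (PySem.List.pyRange 0 ((PySem.List.count l m : Nat) : Int) 1).foldl
        (fun l' _ => pvRemoveMax l') l
    else
      pvRemoveMax l

def makniGetNajvece (lista : List Int) (n : Int) : List Int :=
  (PySem.List.pyRange 0 n 1).foldl (fun l _ => pvStep l) lista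

-- ===== PORT B =====
def makniGetNajvece_alt (lista : List Int) (n : Int) : List Int :=
  if n ≤ 0 then lista
  else
    let d := PySem.List.sorted (PySem.Set.ofList lista) (fun x => x) true
    match PySem.List.pyGet? d (n - 1) with
    | none => lista   -- d[n-1] raises IndexError in Python; excluded by Pre_
    | some t => lista.filter (fun x => decide (x < t))

-- ===== PRECONDITION & SPEC =====
-- Pre_ excludes exactly the inputs on which A raises ValueError (max of an emptied list): n larger
-- than the number of distinct values of lista.  B raises IndexError on the same inputs.
def Pre_makniGetNajvece (lista : List Int) (n : Int) : Prop :=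
  n ≤ ((PySem.List.dedup lista).length : Int)
instance (lista : List Int) (n : Int) : Decidable (Pre_makniGetNajvece lista n) := by
  unfold Pre_makniGetNajvece; infer_instance
def pvWitness_makniGetNajvece : List Int × Int := ([3, 1, 2, 3], 2)

def Spec_makniGetNajvece (lista : List Int) (n : Int) (out : List Int) : Prop := out = makniGetNajvece_alt lista n
instance (lista : List Int) (n : Int) (out : List Int) : Decidable (Spec_makniGetNajvece lista n out) := by unfold Spec_makniGetNajvece; infer_instance

-- ===== CLAIM (what is proved, stated in full; the proofs are below) =====
def Claim_equal_makniGetNajvece : Prop := ∀ (lista : List Int) (n : Int), Dom_makniGetNajvece lista n → Pre_makniGetNajvece lista n → Spec_makniGetNajvece lista n (makniGetNajvece lista n)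

-- ===== LEMMAS AND PROOFS =====

-- a foldl that ignores the list's elements is Function.iterate
theorem pvFoldl_const_iterate {α β : Type} (f : α → α) :
    ∀ (r : List β) (init : α), r.foldl (fun l _ => f l) init = f^[r.length] init := by
  intro r
  induction r with
  | nil => intro init; rfl
  | cons a t ih => intro init; simp [List.foldl, ih, Function.iterate_succ_apply]

-- max? with the identity key returns the maximum value
theorem pvMax?_id_eq {l : List Int} {m : Int} (hmem : m ∈ l) (hmax : ∀ y ∈ l, y ≤ m) :
    PySem.List.max? l (fun x => x) = some m := by
  cases h : PySem.List.max? l (fun x => x) with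
  | none => exact absurd ((PySem.List.max?_eq_none_iff l _).mp h) (List.ne_nil_of_mem hmem)
  | some m' =>
      have h2 : ∀ y ∈ l, y ≤ m' := PySem.List.max?_isMax h
      have : m' = m := le_antisymm (hmax m' (PySem.List.max?_mem h)) (h2 m hmem)
      simp [this]

-- filtering away m ignores a prior erase of m
theorem pvErase_filter (m : Int) :
    ∀ l : List Int, (l.erase m).filter (fun x => x != m) = l.filter (fun x => x != m) := by
  intro l
  induction l with
  | nil => rfl
  | cons a t ih =>
      by_cases h : a = m
      · subst h; simp
      · simp [h, ih]

-- removing the (recomputed) max k+1 times from a list whose max occurs k+1 times filters it out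
theorem pvRemoveIter (k : Nat) :
    ∀ (l : List Int) (m : Int), PySem.List.max? l (fun x => x) = some m →
      l.count m = k + 1 → pvRemoveMax^[k + 1] l = l.filter (fun x => x != m) := by
  induction k with
  | zero =>
      intro l m hm hc
      have hmem : m ∈ l := PySem.List.max?_mem hm
      have h1 : pvRemoveMax l = l.erase m := by
        simp [pvRemoveMax, hm, PySem.List.remove?_eq_some_erase l m hmem]
      have hnot : m ∉ l.erase m := by
        intro hmem'
        have := List.count_pos_iff.mpr hmem'
        rw [List.count_erase_self] at this
        omega
      have h2 : (l.erase m).filter (fun x => x != m) = l.erase m := by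
        apply List.filter_eq_self.mpr
        intro a ha
        simp only [bne_iff_ne, ne_eq]
        intro h; exact hnot (h ▸ ha)
      rw [Function.iterate_one, h1, ← h2, pvErase_filter]
  | succ k ih =>
      intro l m hm hc
      have hmem : m ∈ l := PySem.List.max?_mem hm
      have hmax : ∀ y ∈ l, y ≤ m := PySem.List.max?_isMax hm
      have h1 : pvRemoveMax l = l.erase m := by
        simp [pvRemoveMax, hm, PySem.List.remove?_eq_some_erase l m hmem]
      have hc' : (l.erase m).count m = k + 1 := by
        rw [List.count_erase_self]; omega
      have hmem' : m ∈ l.erase m := by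
        have : 0 < (l.erase m).count m := by omega
        exact List.count_pos_iff.mp this
      have hmax' : ∀ y ∈ l.erase m, y ≤ m := fun y hy => hmax y (List.mem_of_mem_erase hy)
      have hm' : PySem.List.max? (l.erase m) (fun x => x) = some m := pvMax?_id_eq hmem' hmax'
      rw [Function.iterate_succ_apply, h1, ih (l.erase m) m hm' hc', pvErase_filter]

-- one iteration of A's outer loop removes every occurrence of the maximum
theorem pvStep_eq {l : List Int} {m : Int} (hm : PySem.List.max? l (fun x => x) = some m) :
    pvStep l = l.filter (fun x => x != m) := by
  have hmem : m ∈ l := PySem.List.max?_mem hm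
  have hcpos : 0 < l.count m := List.count_pos_iff.mpr hmem
  have hcnt : PySem.List.count l m = l.count m := PySem.List.count_eq l m
  obtain ⟨k, hk⟩ : ∃ k, l.count m = k + 1 := ⟨l.count m - 1, by omega⟩
  unfold pvStep
  rw [hm]
  simp only [hcnt, hk]
  by_cases h : 1 < k + 1
  · rw [if_pos h, pvFoldl_const_iterate, PySem.List.length_pyRange_one]
    have : ((k : Int) + 1 - 0).toNat = k + 1 := by omega
    rw [show (((k + 1 : Nat) : Int)) = (k : Int) + 1 by push_cast; ring, this]
    exact pvRemoveIter k l m hm hk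
  · rw [if_neg h]
    have hk0 : k = 0 := by omega
    have := pvRemoveIter k l m hm hk
    rw [hk0, Function.iterate_one] at this
    exact this

-- the descending list of distinct values, as B computes it
def pvD (lista : List Int) : List Int :=
  PySem.List.sorted (PySem.Set.ofList lista) (fun x => x) true

theorem pvD_mem (lista : List Int) (x : Int) : x ∈ pvD lista ↔ x ∈ lista := by
  rw [pvD, PySem.List.mem_sorted, PySem.Set.mem_ofList]

theorem pvD_strict (lista : List Int) : (pvD lista).Pairwise (fun a b => b < a) := by
  have h1 : (pvD lista).Pairwise (fun a b : Int => b ≤ a) :=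
    PySem.List.sorted_pairwise_rev _ _
  have h2 : (pvD lista).Nodup := by
    rw [pvD]
    exact (PySem.List.sorted_perm _ _ _).symm.nodup (PySem.Set.nodup_ofList lista)
  refine (h1.and h2).imp ?_
  intro a b h
  exact lt_of_le_of_ne h.1 (fun he => h.2 he.symm)

-- invariant: k iterations of A's outer loop leave exactly the elements among the last distinct values
theorem pvInv (lista : List Int) :
    ∀ k : Nat, k ≤ (pvD lista).length →
      pvStep^[k] lista = lista.filter (fun x => decide (x ∈ (pvD lista).drop k)) := by
  intro k
  induction k with
  | zero =>
      intro _
      rw [Function.iterate_zero_apply]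
      symm
      apply List.filter_eq_self.mpr
      intro a ha
      simp [List.drop_zero, pvD_mem, ha]
  | succ k ih =>
      intro hk
      have hklt : k < (pvD lista).length := by omega
      have hdrop : (pvD lista).drop k = (pvD lista)[k] :: (pvD lista).drop (k + 1) :=
        List.drop_eq_getElem_cons hklt
      set m := (pvD lista)[k] with hmdef
      set l := lista.filter (fun x => decide (x ∈ (pvD lista).drop k)) with hldef
      have hpw : ((pvD lista).drop k).Pairwise (fun a b => b < a) :=
        (pvD_strict lista).drop
      have htail : ∀ y ∈ (pvD lista).drop (k + 1), y < m := by
        rw [hdrop] at hpw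
        exact fun y hy => (List.pairwise_cons.mp hpw).1 y hy
      have hmem : m ∈ l := by
        rw [hldef, List.mem_filter]
        refine ⟨(pvD_mem lista m).mp (List.getElem_mem hklt), by simp [hdrop]⟩
      have hmax : ∀ y ∈ l, y ≤ m := by
        intro y hy
        rw [hldef, List.mem_filter] at hy
        have hyk : y ∈ (pvD lista).drop k := by simpa using hy.2
        rw [hdrop] at hyk
        rcases List.mem_cons.mp hyk with h | h
        · exact le_of_eq h
        · exact le_of_lt (htail y h)
      have hm : PySem.List.max? l (fun x => x) = some m := pvMax?_id_eq hmem hmax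
      rw [Function.iterate_succ_apply', ih (by omega), pvStep_eq hm, hldef,
        List.filter_filter]
      apply List.filter_congr
      intro x _
      rw [Bool.eq_iff_iff]
      simp only [Bool.and_eq_true, bne_iff_ne, ne_eq, decide_eq_true_eq]
      constructor
      · rintro ⟨hne, hmem'⟩
        rw [hdrop] at hmem'
        rcases List.mem_cons.mp hmem' with h | h
        · exact absurd h hne
        · exact h
      · intro h
        exact ⟨fun he => absurd (he ▸ h) (fun hh => lt_irrefl m (htail m hh)), by
          rw [hdrop]; exact List.mem_cons_of_mem _ h⟩

-- for 1 ≤ k ≤ length, membership in the last (length−k) distinct values is the threshold test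
theorem pvDrop_iff_lt (lista : List Int) (k : Nat) (hk1 : 1 ≤ k)
    (x : Int) (hx : x ∈ lista)
    (hkl : k - 1 < (pvD lista).length) :
    x ∈ (pvD lista).drop k ↔ x < (pvD lista)[k - 1] := by
  have hpw := pvD_strict lista
  have hsplit : ∀ a ∈ (pvD lista).take k, ∀ b ∈ (pvD lista).drop k, b < a := by
    have := (List.take_append_drop k (pvD lista)) ▸ hpw
    exact (List.pairwise_append.mp this).2.2
  have hmemtake : (pvD lista)[k - 1] ∈ (pvD lista).take k := by
    have h1 : k - 1 < ((pvD lista).take k).length := by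
      simp [List.length_take]; omega
    have : ((pvD lista).take k)[k - 1]'h1 = (pvD lista)[k - 1] := List.getElem_take
    exact this ▸ List.getElem_mem h1
  constructor
  · intro h
    exact hsplit _ hmemtake _ h
  · intro hlt
    have hxd : x ∈ (pvD lista) := (pvD_mem lista x).mpr hx
    rw [← List.take_append_drop k (pvD lista), List.mem_append] at hxd
    rcases hxd with h | h
    · exfalso
      have hksub : k - 1 + 1 = k := by omega
      rw [← hksub, List.take_add_one] at h
      rw [List.getElem?_eq_getElem hkl] at h
      simp only [Option.toList_some, List.mem_append, List.mem_singleton] at h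
      rcases h with h | h
      · -- x strictly before position k-1: x > d[k-1], contradiction
        have hsplit' : ∀ a ∈ (pvD lista).take (k - 1), ∀ b ∈ (pvD lista).drop (k - 1), b < a := by
          have := (List.take_append_drop (k - 1) (pvD lista)) ▸ hpw
          exact (List.pairwise_append.mp this).2.2
        have hmemdrop : (pvD lista)[k - 1] ∈ (pvD lista).drop (k - 1) := by
          rw [List.drop_eq_getElem_cons hkl]; exact List.mem_cons_self
        have := hsplit' x h _ hmemdrop
        omega
      · omega
    · exact h

-- ===== VERDICT (by name: the statement is the Claim_ definition above) =====
theorem makniGetNajvece_spec : Claim_equal_makniGetNajvece := by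
  intro lista n _ hpre
  unfold Spec_makniGetNajvece
  unfold Pre_makniGetNajvece at hpre
  rw [PySem.List.dedup_eq_ofList] at hpre
  have hlen : ((PySem.Set.ofList lista).length : Int) = ((pvD lista).length : Int) := by
    rw [pvD, PySem.List.length_sorted]
  rw [hlen] at hpre
  by_cases hn : n ≤ 0
  · rw [makniGetNajvece, PySem.List.pyRange_one_eq_nil hn, List.foldl_nil,
      makniGetNajvece_alt, if_pos hn]
  · have hn1 : 1 ≤ n := by omega
    set k := n.toNat with hkdef
    have hk1 : 1 ≤ k := by omega
    have hk2 : k ≤ (pvD lista).length := by omega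
    have hkl : k - 1 < (pvD lista).length := by omega
    -- A's side
    have hA : makniGetNajvece lista n = lista.filter (fun x => decide (x ∈ (pvD lista).drop k)) := by
      rw [makniGetNajvece, pvFoldl_const_iterate, PySem.List.length_pyRange_one]
      have : (n - 0).toNat = k := by omega
      rw [this, pvInv lista k hk2]
    -- B's side
    have hidx : (n - 1).toNat = k - 1 := by omega
    have hget : PySem.List.pyGet? (pvD lista) (n - 1) = some ((pvD lista)[k - 1]) := by
      have h0 : (0 : Int) ≤ n - 1 := by omega
      have h1 : n - 1 < ((pvD lista).length : Int) := by omega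
      rw [PySem.List.pyGet?_eq_some_getElem _ h0 h1]
      simp only [hidx]
    have hB : makniGetNajvece_alt lista n
        = lista.filter (fun x => decide (x < (pvD lista)[k - 1])) := by
      unfold makniGetNajvece_alt
      rw [if_neg hn]
      show (match PySem.List.pyGet? (pvD lista) (n - 1) with
            | none => lista
            | some t => lista.filter (fun x => decide (x < t))) = _
      rw [hget]
    rw [hA, hB]
    apply List.filter_congr
    intro x hx
    simp only [decide_eq_decide]
    exact pvDrop_iff_lt lista k hk1 x hx hkl
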